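-- pv_equiv track=rewrite | github.com/kkotysz/plokoon12.github.io | scripts/gallery_ingest.py | allocate_target_name
-- ===== SOURCE A (Python) =====
-- def alpha_suffix(index: int) -> str:
--     chars: list[str] = []
--     n = index
--     while True:
--         chars.append(chr(ord("a") + (n % 26)))
--         n = n // 26 - 1
--         if n < 0:
--             break
--     return "".join(reversed(chars))
--
-- def allocate_target_name(base_stem: str, used_names: set[str]) -> str:
--     plain = f"{base_stem}.jpg"
--     if plain not in used_names:
--         used_names.add(plain)
--         return plain
--
--     i = 0
--     while True:
--         candidate = f"{base_stem}_{alpha_suffix(i)}.jpg"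
--         if candidate not in used_names:
--             used_names.add(candidate)
--             return candidate
--         i += 1
-- ===== SOURCE B (Python) =====
-- # Like A, mutates used_names by adding the returned name (same side effect as A).
-- def allocate_target_name(base_stem: str, used_names: set[str]) -> str:
--     plain = f"{base_stem}.jpg"
--     if plain not in used_names:
--         used_names.add(plain)
--         return plain
--
--     alphabet = [chr(c) for c in range(ord("a"), ord("z") + 1)]
--     suffixes = [""]
--     while True:
--         # all suffixes of the next length, in lexicographic order
--         suffixes = [s + c for s in suffixes for c in alphabet]
--         for s in suffixes:
--             candidate = f"{base_stem}_{s}.jpg"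
--             if candidate not in used_names:
--                 used_names.add(candidate)
--                 return candidate
-- ===== Notes on version B (the rewrite author's own statement) =====
-- stated objective: alternative
-- what changed: Replaces the per-index bijective base-26 arithmetic helper (alpha_suffix) with direct generation of whole levels of suffix strings (all length-1, then length-2, ...) in lexicographic order, scanning each level for the first free candidate.
import Mathlib
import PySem

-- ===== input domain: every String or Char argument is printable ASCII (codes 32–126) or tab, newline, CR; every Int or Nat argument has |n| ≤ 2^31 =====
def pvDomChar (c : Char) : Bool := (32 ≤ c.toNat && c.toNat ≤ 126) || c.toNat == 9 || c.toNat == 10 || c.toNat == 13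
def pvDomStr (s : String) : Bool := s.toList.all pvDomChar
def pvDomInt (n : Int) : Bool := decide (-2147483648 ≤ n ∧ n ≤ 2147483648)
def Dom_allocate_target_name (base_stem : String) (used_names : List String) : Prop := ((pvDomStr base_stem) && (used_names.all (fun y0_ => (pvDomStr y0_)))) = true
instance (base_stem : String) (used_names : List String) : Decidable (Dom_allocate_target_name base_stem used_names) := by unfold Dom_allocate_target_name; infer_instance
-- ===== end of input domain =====

-- B replaces A's per-index bijective base-26 arithmetic by level-wise generation of suffix
-- strings (alternative decomposition, same cost); like A, the Python B also adds the returned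
-- name to the caller's set (same side effect) — the theorems here are about the return value.

-- ===== PORT A =====
-- Python's alpha_suffix loop: append chr(97 + n%26), set n = n//26 - 1, stop when negative
-- (called only with n ≥ 0, so Nat is exact: n//26 - 1 < 0 iff n < 26); then join reversed.
def alphaChars (n : Nat) : List Char :=
  Char.ofNat (97 + n % 26) :: (if _h : n < 26 then [] else alphaChars (n / 26 - 1))
decreasing_by omega

def alpha_suffix (n : Nat) : String := String.ofList (alphaChars n).reverse

-- Python's unbounded `while True` search; fuel (used_names.length + 1) provably suffices
-- because the candidates are pairwise distinct (lemma exists_free below), so the 0-fuel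
-- branch is never reached.
def loopA (base : String) (used : List String) : Nat → Nat → String
  | 0, _ => ""
  | fuel+1, i =>
    let candidate := base ++ "_" ++ alpha_suffix i ++ ".jpg"
    if candidate ∈ used then loopA base used fuel (i+1) else candidate

def allocate_target_name (base_stem : String) (used_names : List String) : String :=
  let plain := base_stem ++ ".jpg"
  if plain ∈ used_names then
    loopA base_stem used_names (used_names.length + 1) 0
  else
    plain

-- ===== PORT B =====
-- [chr(c) for c in range(ord('a'), ord('z')+1)]
def pyAlphabet : List String := (List.range 26).map (fun c => String.ofList [Char.ofNat (97 + c)])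

-- suffixes = [s + c for s in suffixes for c in alphabet]
def nextLevel (suffixes : List String) : List String :=
  suffixes.flatMap (fun s => pyAlphabet.map (fun c => s ++ c))

-- the inner `for s in suffixes: … return candidate` scan of one level
def findFree (base : String) (used : List String) : List String → Option String
  | [] => none
  | s :: rest =>
    let candidate := base ++ "_" ++ s ++ ".jpg"
    if candidate ∈ used then findFree base used rest else some candidate

-- Python's unbounded `while True` over levels; (used_names.length + 1) levels provably
-- suffice (the levels hold pairwise-distinct candidates, ≥ 26 per level), so 0 fuel is
-- never reached.
def loopB (base : String) (used : List String) : Nat → List String → String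
  | 0, _ => ""
  | fuel+1, suffixes =>
    let next := nextLevel suffixes
    match findFree base used next with
    | some c => c
    | none => loopB base used fuel next

def allocate_target_name_alt (base_stem : String) (used_names : List String) : String :=
  let plain := base_stem ++ ".jpg"
  if plain ∈ used_names then
    loopB base_stem used_names (used_names.length + 1) [""]
  else
    plain

-- ===== PRECONDITION & SPEC =====
def Spec_allocate_target_name (base_stem : String) (used_names : List String) (out : String) : Prop := out = allocate_target_name_alt base_stem used_names
instance (base_stem : String) (used_names : List String) (out : String) : Decidable (Spec_allocate_target_name base_stem used_names out) := by unfold Spec_allocate_target_name; infer_instance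

-- ===== CLAIM (what is proved, stated in full; the proofs are below) =====
def Claim_equal_allocate_target_name : Prop := ∀ (base_stem : String) (used_names : List String), Dom_allocate_target_name base_stem used_names → Spec_allocate_target_name base_stem used_names (allocate_target_name base_stem used_names)

-- ===== LEMMAS AND PROOFS =====

-- the i-th candidate string, shared vocabulary of both loop analyses
def cand (base : String) (i : Nat) : String := base ++ "_" ++ alpha_suffix i ++ ".jpg"

-- start index (in A's enumeration) of the suffixes of length l+1
def off : Nat → Nat
  | 0 => 0
  | l+1 => off l + 26^(l+1)

-- the l-fold application of nextLevel to [""]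
def lvlList : Nat → List String
  | 0 => [""]
  | l+1 => nextLevel (lvlList l)

lemma off_succ_eq : ∀ l : Nat, off (l+1) = 26 * (off l + 1)
  | 0 => by simp [off]
  | l+1 => by
    have ih := off_succ_eq l
    have h1 : off (l+1+1) = off (l+1) + 26^(l+2) := rfl
    have h2 : (26:Nat)^(l+2) = 26 * 26^(l+1) := by ring
    have h3 : off (l+1) = off l + 26^(l+1) := rfl
    omega

lemma off_ge (l : Nat) : l ≤ off l := by
  induction l with
  | zero => exact Nat.zero_le _
  | succ l ih =>
    have h1 : off (l+1) = off l + 26^(l+1) := rfl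
    have h2 : 1 ≤ (26:Nat)^(l+1) := Nat.one_le_pow _ _ (by norm_num)
    omega

lemma charEq {m n : Nat} (hm : m < 26) (hn : n < 26)
    (h : Char.ofNat (97+m) = Char.ofNat (97+n)) : m = n := by
  have := congrArg Char.toNat h
  rw [Char.toNat_ofNat, Char.toNat_ofNat, if_pos (by constructor; omega),
      if_pos (by constructor; omega)] at this
  omega

lemma alphaChars_inj : ∀ m n : Nat, alphaChars m = alphaChars n → m = n := by
  intro m
  induction m using Nat.strong_induction_on with
  | _ m ih =>
    intro n h
    conv at h => lhs; rw [alphaChars]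
    conv at h => rhs; rw [alphaChars]
    simp only [List.cons.injEq] at h
    obtain ⟨hh, ht⟩ := h
    have hmod : m % 26 = n % 26 :=
      charEq (Nat.mod_lt _ (by norm_num)) (Nat.mod_lt _ (by norm_num)) hh
    split_ifs at ht with h1 h2 h2
    · omega
    · exact absurd ht.symm (by rw [alphaChars]; simp)
    · exact absurd ht (by rw [alphaChars]; simp)
    · have := ih (m / 26 - 1) (by omega) (n / 26 - 1) ht
      omega

lemma cand_inj (base : String) : Function.Injective (cand base) := by
  intro i j h
  unfold cand at h
  have h2 := congrArg String.toList h
  simp only [String.toList_append] at h2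
  have h3 := List.append_cancel_left (List.append_cancel_right h2)
  apply alphaChars_inj
  have := congrArg List.reverse (by simpa [alpha_suffix] using h3)
  simpa using this

lemma alpha_small {k : Nat} (h : k < 26) :
    alpha_suffix k = String.ofList [Char.ofNat (97 + k)] := by
  rw [alpha_suffix, alphaChars, dif_pos h, Nat.mod_eq_of_lt h]
  simp

lemma alpha_step {l q r : Nat} (hr : r < 26) :
    alpha_suffix (off (l+1) + (26*q + r))
      = alpha_suffix (off l + q) ++ String.ofList [Char.ofNat (97 + r)] := by
  have hoff := off_succ_eq l
  have h26 : ¬ (off (l+1) + (26*q + r)) < 26 := by omega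
  have hmod : (off (l+1) + (26*q + r)) % 26 = r := by omega
  have hdiv : (off (l+1) + (26*q + r)) / 26 - 1 = off l + q := by omega
  conv_lhs => rw [alpha_suffix, alphaChars, dif_neg h26, hmod, hdiv]
  rw [alpha_suffix]
  simp

lemma flatMap_range_map (n : Nat) (F : Nat → String) :
    (List.range n).flatMap (fun q => (List.range 26).map (fun r => F (26*q + r)))
      = (List.range (26*n)).map F := by
  induction n with
  | zero => simp
  | succ n ih =>
    rw [List.range_succ (n := n), List.flatMap_append, ih]
    rw [show 26 * (n+1) = 26*n + 26 from by ring, List.range_add (n := 26*n) (m := 26),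
        List.map_append]
    simp [List.map_map, Function.comp]

lemma lvl_enum : ∀ l : Nat, lvlList (l+1)
    = (List.range (26^(l+1))).map (fun k => alpha_suffix (off l + k)) := by
  intro l
  induction l with
  | zero =>
    show nextLevel [""] = _
    rw [nextLevel, pyAlphabet]
    simp only [List.flatMap_cons, List.flatMap_nil, List.append_nil, List.map_map]
    rw [show (26:Nat)^(0+1) = 26 from by norm_num]
    refine List.map_congr_left fun k hk => ?_
    have hk26 : k < 26 := List.mem_range.mp hk
    simp [Function.comp, (alpha_small hk26).symm, off]
  | succ l ih =>
    show nextLevel (lvlList (l+1)) = _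
    rw [ih, nextLevel, List.flatMap_map]
    have hfun : ∀ q : Nat, pyAlphabet.map (fun c => alpha_suffix (off l + q) ++ c)
        = (List.range 26).map (fun r => alpha_suffix (off (l+1) + (26*q + r))) := by
      intro q
      rw [pyAlphabet, List.map_map]
      exact List.map_congr_left fun r hr => by
        simp only [Function.comp]
        exact (alpha_step (List.mem_range.mp hr)).symm
    simp only [hfun]
    rw [flatMap_range_map (26^(l+1)) (fun k => alpha_suffix (off (l+1) + k)),
        show 26 * 26^(l+1) = 26^(l+1+1) from by ring]

lemma findFree_none (base : String) (used : List String) :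
    ∀ ss : List String, (∀ s ∈ ss, (base ++ "_" ++ s ++ ".jpg") ∈ used) →
      findFree base used ss = none := by
  intro ss
  induction ss with
  | nil => intro _; rfl
  | cons s rest ih =>
    intro h
    simp only [findFree]
    rw [if_pos (h s List.mem_cons_self)]
    exact ih (fun t ht => h t (List.mem_cons_of_mem _ ht))

lemma findFree_some (base : String) (used : List String) (s : String)
    (hs : (base ++ "_" ++ s ++ ".jpg") ∉ used) :
    ∀ pre post : List String, (∀ t ∈ pre, (base ++ "_" ++ t ++ ".jpg") ∈ used) →
      findFree base used (pre ++ s :: post) = some (base ++ "_" ++ s ++ ".jpg") := by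
  intro pre
  induction pre with
  | nil =>
    intro post _
    simp only [List.nil_append, findFree]
    rw [if_neg hs]
  | cons t rest ih =>
    intro post h
    simp only [List.cons_append, findFree]
    rw [if_pos (h t List.mem_cons_self)]
    exact ih post (fun u hu => h u (List.mem_cons_of_mem _ hu))

lemma exists_free (base : String) (used : List String) :
    ∃ i, i < used.length + 1 ∧ cand base i ∉ used := by
  by_contra hno
  push Not at hno
  set L := (List.range (used.length + 1)).map (cand base) with hL
  have hnd : L.Nodup := (List.nodup_range).map (cand_inj base)
  have hsub : L.toFinset ⊆ used.toFinset := by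
    intro x hx
    rw [List.mem_toFinset] at *
    obtain ⟨i, hi, rfl⟩ := List.mem_map.mp hx
    exact hno i (List.mem_range.mp hi)
  have h1 : L.toFinset.card = L.length := List.toFinset_card_of_nodup hnd
  have h2 : used.toFinset.card ≤ used.length := List.toFinset_card_le used
  have h3 := Finset.card_le_card hsub
  have h4 : L.length = used.length + 1 := by simp [hL]
  omega

lemma loopA_spec (base : String) (used : List String)
    (h : ∃ i, cand base i ∉ used) :
    ∀ fuel i, i ≤ Nat.find h → Nat.find h < i + fuel →
      loopA base used fuel i = cand base (Nat.find h) := by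
  intro fuel
  induction fuel with
  | zero => intro i h1 h2; omega
  | succ fuel ih =>
    intro i h1 h2
    simp only [loopA]
    by_cases hc : cand base i ∈ used
    · have hne : i ≠ Nat.find h := by
        intro he; exact (Nat.find_spec h) (he ▸ hc)
      rw [if_pos (by exact hc)]
      exact ih (i+1) (by omega) (by omega)
    · have hle : Nat.find h ≤ i := Nat.find_min' h hc
      have heq : i = Nat.find h := by omega
      rw [if_neg (by exact hc), heq]
      rfl

lemma loopB_spec (base : String) (used : List String)
    (h : ∃ i, cand base i ∉ used) :
    ∀ fuel l, off l ≤ Nat.find h → Nat.find h < off (l + fuel) →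
      loopB base used fuel (lvlList l) = cand base (Nat.find h) := by
  intro fuel
  induction fuel with
  | zero =>
    intro l h1 h2
    simp only [Nat.add_zero] at h2
    omega
  | succ fuel ih =>
    intro l h1 h2
    simp only [loopB]
    have hnext : nextLevel (lvlList l) = lvlList (l+1) := rfl
    rw [hnext, lvl_enum l]
    have hstep : off (l+1) = off l + 26^(l+1) := rfl
    by_cases hcase : Nat.find h < off (l+1)
    · -- the first free candidate lies in this level
      set j := Nat.find h with hj
      set k0 := j - off l with hk0
      have hlt : k0 < 26^(l+1) := by omega
      have hidx : off l + k0 = j := by omega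
      have hspl : List.range (26^(l+1))
          = (List.range k0 ++ [k0]) ++ (List.range (26^(l+1) - (k0+1))).map ((k0+1) + ·) := by
        rw [← List.range_succ (n := k0), ← List.range_add (n := k0+1)]
        congr 1
        omega
      rw [hspl, List.map_append, List.map_append]
      simp only [List.map_cons, List.map_nil, List.append_assoc, List.singleton_append]
      have hfound := findFree_some base used (alpha_suffix (off l + k0))
        (by rw [show (base ++ "_" ++ alpha_suffix (off l + k0) ++ ".jpg") = cand base j from by
              rw [hidx]; rfl]
            exact Nat.find_spec h)
        ((List.range k0).map (fun k => alpha_suffix (off l + k)))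
        (((List.range (26^(l+1) - (k0+1))).map ((k0+1) + ·)).map fun k => alpha_suffix (off l + k))
        (by
          intro t ht
          obtain ⟨k, hk, rfl⟩ := List.mem_map.mp ht
          have hklt : k < k0 := List.mem_range.mp hk
          have : ¬ (cand base (off l + k) ∉ used) := Nat.find_min h (by omega)
          simpa [cand] using this)
      rw [hfound, hidx]
      rfl
    · -- every candidate of this level is used: recurse to the next level
      rw [findFree_none base used _ (by
        intro s hs
        obtain ⟨k, hk, rfl⟩ := List.mem_map.mp hs
        have hklt : k < 26^(l+1) := List.mem_range.mp hk
        have : ¬ (cand base (off l + k) ∉ used) := Nat.find_min h (by omega)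
        simpa [cand] using this)]
      rw [← lvl_enum l]
      have harg : l + (fuel + 1) = (l + 1) + fuel := by omega
      rw [harg] at h2
      exact ih (l+1) (by omega) h2

-- ===== VERDICT (by name: the statement is the Claim_ definition above) =====
theorem allocate_target_name_spec : Claim_equal_allocate_target_name := by
  intro base used _dom
  unfold Spec_allocate_target_name allocate_target_name allocate_target_name_alt
  by_cases hp : (base ++ ".jpg") ∈ used
  · simp only [if_pos hp]
    obtain ⟨i0, hi0, hfree⟩ := exists_free base used
    have h : ∃ i, cand base i ∉ used := ⟨i0, hfree⟩
    have hj : Nat.find h ≤ i0 := Nat.find_min' h hfree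
    rw [loopA_spec base used h (used.length + 1) 0 (by omega) (by omega)]
    have hoff : used.length + 1 ≤ off (used.length + 1) := off_ge _
    rw [show ([""] : List String) = lvlList 0 from rfl,
        loopB_spec base used h (used.length + 1) 0 (by simp [off])
          (by simp only [Nat.zero_add]; omega)]
  · simp only [if_neg hp]
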